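-- pv_equiv track=rewrite | github.com/mjc239/aoc23 | aoc23/day13.py | summarise_notes
-- ===== SOURCE A (Python) =====
-- def summarise_notes(grid: list[str], num_differences=0) -> int:
--     # n columns, m rows
--     n = len(grid[0])
--     m = len(grid)
--
--     # A neat way to transpose a list of strings!
--     transposed_grid = list(map(lambda x: "".join(x), zip(*grid)))
--
--     # Check each potential row/column mirror position
--     # Exact reflections will have 0 differences
--     potential_horizontal_line = [
--         sum_differences(grid[j::-1], grid[j + 1 :]) for j in range(m - 1)
--     ]
--     potential_vertical_line = [
--         sum_differences(transposed_grid[i::-1], transposed_grid[i + 1 :])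
--         for i in range(n - 1)
--     ]
--
--     # Compute the summaries by finding entries with 0 differences
--     horizontal_summary = sum(
--         [
--             100 * (j + 1)
--             for j, val in enumerate(potential_horizontal_line)
--             if val == num_differences
--         ]
--     )
--     vertical_summary = sum(
--         [
--             i + 1
--             for i, val in enumerate(potential_vertical_line)
--             if val == num_differences
--         ]
--     )
--
--     # Puzzle leaves open possibility of multiple mirror lines
--     return horizontal_summary + vertical_summary
--
-- def sum_differences(half_1: list[str], half_2: list[str]) -> int:
--     # Only compare the overlapping portions
--     min_length = min(len(half_1), len(half_2))
--     half_1 = half_1[:min_length]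
--     half_2 = half_2[:min_length]
--
--     # For each half of the array, compare the corresponding strings
--     # Sum the number of differences between each pair
--     diffs = [
--         sum([char_1 != char_2 for char_1, char_2 in zip(string_1, string_2)])
--         for string_1, string_2 in zip(half_1, half_2)
--     ]
--
--     return sum(diffs)
-- ===== SOURCE B (Python) =====
-- def summarise_notes(grid: list[str], num_differences=0) -> int:
--     # Scatter pass: every unordered pair of lines contributes its mismatch
--     # count to the single reflection boundary it straddles; a boundary whose
--     # accumulated count hits the target scores its 1-based position.
--     columns = ["".join(col) for col in zip(*grid)]
--     return (100 * _reflection_score(grid, num_differences)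
--             + _reflection_score(columns, num_differences))
--
--
-- def _reflection_score(lines, target) -> int:
--     k = len(lines)
--     diffs = [0] * (k - 1)
--     for a in range(k):
--         for b in range(a + 1, k):
--             if (a + b) % 2:
--                 diffs[(a + b - 1) // 2] += sum(
--                     c1 != c2 for c1, c2 in zip(lines[a], lines[b]))
--     return sum(j + 1 for j, d in enumerate(diffs) if d == target)
-- ===== Notes on version B (the rewrite author's own statement) =====
-- stated objective: alternative
-- what changed: Instead of slicing the grid (and its transpose) around each candidate boundary and comparing the two reflected halves, B makes one pass over all unordered line pairs, scattering each pair's character-mismatch count into a boundary-indexed difference table (a pair a<b with a+b odd belongs to boundary (a+b-1)//2), then scores the boundaries whose accumulated count equals num_differences; the same scorer is applied to the rows and to the zip-transposed columns.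
-- intended difference: On ragged grids whose first row has length >= 2, some row is shorter, and num_differences = 0, A additionally scores phantom column boundaries beyond the zip-truncated transpose (it ranges column boundaries over len(grid[0])-1 while zip(*grid) only yields min-row-length columns), so A returns a larger total; B scores only the boundaries between columns that actually exist, which is the intended value. — e.g. on summarise_notes(["ab", "a"], 0): A returns 101, B returns 100
import Mathlib
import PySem

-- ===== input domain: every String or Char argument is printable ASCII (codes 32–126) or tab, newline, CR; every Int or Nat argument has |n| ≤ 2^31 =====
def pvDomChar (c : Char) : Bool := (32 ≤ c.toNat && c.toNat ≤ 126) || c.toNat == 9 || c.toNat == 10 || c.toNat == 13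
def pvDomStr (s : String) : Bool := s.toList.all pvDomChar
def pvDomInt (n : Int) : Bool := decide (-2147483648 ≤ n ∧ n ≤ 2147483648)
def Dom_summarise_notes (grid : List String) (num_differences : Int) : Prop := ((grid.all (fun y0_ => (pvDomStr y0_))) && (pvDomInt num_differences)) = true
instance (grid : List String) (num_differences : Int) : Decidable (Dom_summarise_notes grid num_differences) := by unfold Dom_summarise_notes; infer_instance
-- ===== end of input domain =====

-- B replaces A's per-boundary slice-and-gather (and its materialised transpose) by a
-- scatter of every line pair's mismatch count into a boundary-indexed table, one scorer
-- shared by rows and zip-transposed columns (alternative decomposition; same asymptotic cost).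


-- ===== PORT A =====
-- sum([char_1 != char_2 for char_1, char_2 in zip(string_1, string_2)])
def pvA_mism (s t : List Char) : Int :=
  ((s.zip t).map (fun p => if p.1 ≠ p.2 then (1 : Int) else 0)).sum

def pvA_sumDifferences (half1 half2 : List (List Char)) : Int :=
  let minLength := min half1.length half2.length
  let h1 := half1.take minLength
  let h2 := half2.take minLength
  ((h1.zip h2).map (fun p => pvA_mism p.1 p.2)).sum

-- min over all row lengths (zip(*grid) stops at the shortest row)
def pvA_minLen (rows : List (List Char)) : Nat :=
  match rows with
  | [] => 0
  | r :: rs => rs.foldl (fun acc s => min acc s.length) r.length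

-- zip(*grid): exact — the result is the list of i-th columns for every i below the minimum row length
def pvA_transpose (rows : List (List Char)) : List (List Char) :=
  (List.range (pvA_minLen rows)).map (fun i => rows.map (fun r => r.getD i ' '))

def summarise_notes (grid : List String) (num_differences : Int) : Int :=
  let rows := grid.map String.toList
  let n := (rows.getD 0 []).length      -- len(grid[0]); Pre_ excludes grid = [] (IndexError)
  let m := rows.length
  let transposed := pvA_transpose rows
  -- grid[j::-1] = (grid.take (j+1)).reverse and grid[j+1:] = grid.drop (j+1): exact for every j ≥ 0 (clamping included)
  let horiz := (List.range (m - 1)).map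
    (fun j => pvA_sumDifferences ((rows.take (j+1)).reverse) (rows.drop (j+1)))
  let vert := (List.range (n - 1)).map
    (fun i => pvA_sumDifferences ((transposed.take (i+1)).reverse) (transposed.drop (i+1)))
  let hs := ((horiz.zipIdx.filter (fun p => p.1 == num_differences)).map
      (fun p => 100 * ((p.2 : Int) + 1))).sum
  let vs := ((vert.zipIdx.filter (fun p => p.1 == num_differences)).map
      (fun p => (p.2 : Int) + 1)).sum
  hs + vs

-- ===== PORT B =====
def pvB_mism (s t : List Char) : Int :=
  ((s.zip t).map (fun p => if p.1 ≠ p.2 then (1 : Int) else 0)).sum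

-- min row length (zip(*grid) stops at the shortest row)
def pvB_minLen (rows : List (List Char)) : Nat :=
  match rows with
  | [] => 0
  | r :: rs => rs.foldl (fun acc s => min acc s.length) r.length

-- columns = ["".join(col) for col in zip(*grid)]
def pvB_cols (rows : List (List Char)) : List (List Char) :=
  (List.range (pvB_minLen rows)).map (fun i => rows.map (fun r => r.getD i ' '))

-- _reflection_score: scatter every pair's mismatch count into the boundary table (diffs), then score
def pvB_table (lines : List (List Char)) : List Int :=
  (List.range lines.length).foldl (fun tbl a =>
    (List.range' (a+1) (lines.length - (a+1))).foldl (fun t2 b =>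
      if (a + b) % 2 == 1 then
        t2.set ((a + b - 1) / 2)
          (t2.getD ((a + b - 1) / 2) 0 + pvB_mism (lines.getD a []) (lines.getD b []))
      else t2) tbl) (List.replicate (lines.length - 1) (0 : Int))

def pvB_score (lines : List (List Char)) (target : Int) : Int :=
  (pvB_table lines).zipIdx.foldl (fun tot p => if p.1 == target then tot + ((p.2 : Int) + 1) else tot) 0

def summarise_notes_alt (grid : List String) (num_differences : Int) : Int :=
  let rows := grid.map String.toList
  let columns := pvB_cols rows
  100 * pvB_score rows num_differences + pvB_score columns num_differences

-- ===== PRECONDITION & SPEC =====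
-- Pre_ excludes only the empty grid, on which A raises IndexError at grid[0].
def Pre_summarise_notes (grid : List String) (num_differences : Int) : Prop := grid ≠ []
instance (grid : List String) (num_differences : Int) : Decidable (Pre_summarise_notes grid num_differences) := by unfold Pre_summarise_notes; infer_instance

def pvWitness_summarise_notes : List String × Int := (["#.", "#."], 0)

-- On ragged grids whose first row has length ≥ 2, some row is shorter, and num_differences = 0,
-- A additionally scores phantom column boundaries beyond the zip-truncated transpose (it ranges
-- column boundaries over len(grid[0])-1 while zip(*grid) only yields min-row-length columns), so
-- A returns a larger total; B scores only the boundaries between columns that actually exist,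
-- which is the intended value.
def D_summarise_notes (grid : List String) (num_differences : Int) : Prop :=
  num_differences = 0 ∧ 2 ≤ (grid.headD "").length ∧ ∃ s ∈ grid, s.length < (grid.headD "").length
instance (grid : List String) (num_differences : Int) : Decidable (D_summarise_notes grid num_differences) := by unfold D_summarise_notes; infer_instance

def Spec_summarise_notes (grid : List String) (num_differences : Int) (out : Int) : Prop := ¬ D_summarise_notes grid num_differences → out = summarise_notes_alt grid num_differences
instance (grid : List String) (num_differences : Int) (out : Int) : Decidable (Spec_summarise_notes grid num_differences out) := by unfold Spec_summarise_notes; infer_instance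

def pvDiffWitness_summarise_notes : List String × Int := (["ab", "a"], 0)
def pvDiffWitnessOut_summarise_notes : Int × Int := (101, 100)

-- ===== CLAIM (what is proved, stated in full; the proofs are below) =====
def Claim_unchanged_summarise_notes : Prop := ∀ (grid : List String) (num_differences : Int), Dom_summarise_notes grid num_differences → Pre_summarise_notes grid num_differences → Spec_summarise_notes grid num_differences (summarise_notes grid num_differences)
def Claim_changed_summarise_notes : Prop := Dom_summarise_notes (pvDiffWitness_summarise_notes.1) (pvDiffWitness_summarise_notes.2) ∧ Pre_summarise_notes (pvDiffWitness_summarise_notes.1) (pvDiffWitness_summarise_notes.2) ∧ D_summarise_notes (pvDiffWitness_summarise_notes.1) (pvDiffWitness_summarise_notes.2) ∧ summarise_notes (pvDiffWitness_summarise_notes.1) (pvDiffWitness_summarise_notes.2) = pvDiffWitnessOut_summarise_notes.1 ∧ summarise_notes_alt (pvDiffWitness_summarise_notes.1) (pvDiffWitness_summarise_notes.2) = pvDiffWitnessOut_summarise_notes.2 ∧ pvDiffWitnessOut_summarise_notes.1 ≠ pvDiffWitnessOut_summarise_notes.2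
def Claim_exact_summarise_notes : Prop := ∀ (grid : List String) (num_differences : Int), Dom_summarise_notes grid num_differences → Pre_summarise_notes grid num_differences → D_summarise_notes grid num_differences → summarise_notes grid num_differences ≠ summarise_notes_alt grid num_differences

-- ===== LEMMAS AND PROOFS =====

-- the common mathematical value of boundary j: total mismatch over all pairs straddling it
def pvF (d : Nat → Nat → Int) (len j : Nat) : Int :=
  ∑ a ∈ Finset.range len, ∑ b ∈ Finset.range len,
    if a < b ∧ a + b = 2 * j + 1 then d a b else 0

-- all ordered pairs a < b < len, in the traversal order of B's nested loops
def pvPairs (len : Nat) : List (Nat × Nat) :=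
  (List.range len).flatMap (fun a => (List.range' (a+1) (len - (a+1))).map (fun b => (a, b)))

theorem pv_sum_map_getD {α : Type} (l : List α) (f : α → Int) (d : α) :
    (l.map f).sum = ∑ i ∈ Finset.range l.length, f (l.getD i d) := by
  induction l with
  | nil => simp
  | cons a t ih =>
      simp [Finset.sum_range_succ', ih]
      ring

theorem pv_zip_map_sum {α : Type} (l1 l2 : List α) (f : α → α → Int) (d : α) :
    ((l1.zip l2).map (fun p => f p.1 p.2)).sum
      = ∑ k ∈ Finset.range (min l1.length l2.length), f (l1.getD k d) (l2.getD k d) := by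
  rw [pv_sum_map_getD _ _ (d, d), List.length_zip]
  refine Finset.sum_congr rfl (fun k hk => ?_)
  rw [Finset.mem_range] at hk
  rw [List.getD_eq_getElem _ _ (by simp; omega), List.getElem_zip]
  rw [List.getD_eq_getElem _ _ (by omega), List.getD_eq_getElem _ _ (by omega)]

-- the diagonal gather k ↦ (j-k, j+1+k) enumerates exactly the pairs with a+b = 2j+1
theorem pv_diag_sum (d : Nat → Nat → Int) (len j : Nat) :
    ∑ k ∈ Finset.range (min (min (j+1) len) (len - (j+1))), d (j - k) (j+1+k)
      = pvF d len j := by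
  unfold pvF
  rw [← Finset.sum_product', ← Finset.sum_filter]
  refine Finset.sum_nbij' (i := fun k => (j - k, j+1+k)) (j := fun p => p.2 - (j+1))
    ?_ ?_ ?_ ?_ ?_ <;> intro x hx <;>
    simp only [Finset.mem_filter, Finset.mem_product, Finset.mem_range] at hx ⊢ <;>
    first
      | omega
      | (obtain ⟨a, b⟩ := x; simp only [Prod.mk.injEq]; constructor <;> omega)

-- A's boundary entry equals pvF
theorem pv_entry_eq_F (X : List (List Char)) (j : Nat) :
    pvA_sumDifferences ((X.take (j+1)).reverse) (X.drop (j+1))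
      = pvF (fun a b => pvA_mism (X.getD a []) (X.getD b [])) X.length j := by
  rw [← pv_diag_sum]
  unfold pvA_sumDifferences
  simp only [List.length_reverse, List.length_take, List.length_drop]
  rw [pv_zip_map_sum _ _ _ []]
  simp only [List.length_take, List.length_reverse, List.length_drop]
  refine Finset.sum_congr ?_ (fun k hk => ?_)
  · congr 1
    omega
  · rw [Finset.mem_range] at hk
    have hlen : j + 1 ≤ X.length := by omega
    congr 1
    · rw [List.getD_eq_getElem _ _ (by simp; omega)]
      rw [List.getElem_take, List.getElem_reverse, List.getElem_take]
      rw [List.getD_eq_getElem _ _ (by omega)]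
      exact getElem_congr rfl (by rw [List.length_take]; omega) (by rw [List.length_take]; omega)
    · rw [List.getD_eq_getElem _ _ (by simp; omega), List.getElem_take, List.getElem_drop,
        List.getD_eq_getElem _ _ (by omega)]

-- pvF vanishes at boundaries past the last real pair
theorem pv_F_zero (d : Nat → Nat → Int) (len j : Nat) (h : len ≤ j + 1) : pvF d len j = 0 := by
  unfold pvF
  refine Finset.sum_eq_zero (fun a ha => Finset.sum_eq_zero (fun b hb => ?_))
  rw [Finset.mem_range] at ha hb
  rw [if_neg (by rintro ⟨h1, h2⟩; omega)]

-- generic scatter fold: length preserved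
theorem pv_scatter_length (items : List (Nat × Nat)) (c : Nat × Nat → Bool)
    (f : Nat × Nat → Nat) (v : Nat × Nat → Int) (tbl : List Int) :
    (items.foldl (fun t x => if c x then t.set (f x) (t.getD (f x) 0 + v x) else t) tbl).length
      = tbl.length := by
  induction items generalizing tbl with
  | nil => rfl
  | cons x xs ih =>
      rw [List.foldl_cons]
      split
      · rw [ih, List.length_set]
      · exact ih tbl

-- generic scatter fold: entry j accumulates the guarded contributions targeting j
theorem pv_scatter_getD (items : List (Nat × Nat)) (c : Nat × Nat → Bool)
    (f : Nat × Nat → Nat) (v : Nat × Nat → Int) (tbl : List Int)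
    (h : ∀ x ∈ items, c x = true → f x < tbl.length) (j : Nat) :
    (items.foldl (fun t x => if c x then t.set (f x) (t.getD (f x) 0 + v x) else t) tbl).getD j 0
      = tbl.getD j 0 + (items.map (fun x => if c x = true ∧ f x = j then v x else 0)).sum := by
  induction items generalizing tbl with
  | nil => simp
  | cons x xs ih =>
      rw [List.foldl_cons, List.map_cons, List.sum_cons]
      by_cases hc : c x = true
      · rw [if_pos hc]
        have hfx : f x < tbl.length := h x (by simp) hc
        rw [ih _ (fun y hy hcy => by
          rw [List.length_set]; exact h y (List.mem_cons_of_mem _ hy) hcy)]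
        by_cases hj : f x = j
        · subst hj
          rw [if_pos ⟨hc, rfl⟩]
          have : (tbl.set (f x) (tbl.getD (f x) 0 + v x)).getD (f x) 0
              = tbl.getD (f x) 0 + v x := by
            simp [List.getD_eq_getElem?_getD, hfx]
          rw [this]; ring
        · rw [if_neg (by simp [hj])]
          have : (tbl.set (f x) (tbl.getD (f x) 0 + v x)).getD j 0 = tbl.getD j 0 := by
            simp [List.getD_eq_getElem?_getD, List.getElem?_set_ne hj]
          rw [this]; ring
      · rw [if_neg hc, ih _ (fun y hy hcy => h y (List.mem_cons_of_mem _ hy) hcy)]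
        rw [if_neg (by simp [hc])]
        ring

theorem pv_mem_pairs (len : Nat) (x : Nat × Nat) :
    x ∈ pvPairs len ↔ x.1 < x.2 ∧ x.2 < len := by
  obtain ⟨a, b⟩ := x
  simp only [pvPairs, List.mem_flatMap, List.mem_map, List.mem_range, List.mem_range'_1,
    Prod.mk.injEq]
  constructor
  · rintro ⟨a', ha', b', hb', rfl, rfl⟩; omega
  · rintro ⟨h1, h2⟩; exact ⟨a, by omega, b, by omega, rfl, rfl⟩

theorem pv_shift_sum (g : Nat → Int) (a len : Nat) :
    ∑ i ∈ Finset.range (len - (a+1)), g (a+1+i)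
      = ∑ b ∈ Finset.range len, if a < b then g b else 0 := by
  rw [← Finset.sum_filter]
  have : Finset.filter (fun b => a < b) (Finset.range len) = Finset.Ico (a+1) len := by
    ext b; simp [Finset.mem_filter, Finset.mem_range, Finset.mem_Ico]; omega
  rw [this, Finset.sum_Ico_eq_sum_range]

theorem pv_sum_flatMap {α : Type} (l : List α) (f : α → List Int) :
    (l.flatMap f).sum = (l.map (fun a => (f a).sum)).sum := by
  induction l with
  | nil => rfl
  | cons a t ih => simp [List.flatMap_cons, List.sum_append, ih]

theorem pv_pairs_sum (len : Nat) (w : Nat × Nat → Int) :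
    ((pvPairs len).map w).sum
      = ∑ a ∈ Finset.range len, ∑ b ∈ Finset.range len, if a < b then w (a, b) else 0 := by
  unfold pvPairs
  rw [List.map_flatMap]
  rw [pv_sum_flatMap]
  rw [pv_sum_map_getD _ _ 0]
  simp only [List.length_range]
  refine Finset.sum_congr rfl (fun a ha => ?_)
  rw [Finset.mem_range] at ha
  rw [List.getD_eq_getElem _ _ (by simpa using ha), List.getElem_range]
  rw [List.map_map, pv_sum_map_getD _ _ 0]
  simp only [List.length_range']
  rw [← pv_shift_sum]
  refine Finset.sum_congr rfl (fun i hi => ?_)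
  rw [Finset.mem_range] at hi
  rw [List.getD_eq_getElem _ _ (by simpa using hi)]
  simp [List.getElem_range']

-- B's nested scatter loops, flattened to the pair list
theorem pv_scatterTable_eq (lines : List (List Char)) (k tl : Nat) :
    (List.range k).foldl (fun tbl a =>
        (List.range' (a+1) (k - (a+1))).foldl (fun t2 b =>
          if (a + b) % 2 == 1 then
            t2.set ((a + b - 1) / 2)
              (t2.getD ((a + b - 1) / 2) 0 + pvB_mism (lines.getD a []) (lines.getD b []))
          else t2) tbl) (List.replicate tl (0 : Int))
      = (pvPairs k).foldl (fun t x => if (x.1 + x.2) % 2 == 1 then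
          t.set ((x.1 + x.2 - 1) / 2)
            (t.getD ((x.1 + x.2 - 1) / 2) 0 + pvB_mism (lines.getD x.1 []) (lines.getD x.2 []))
          else t) (List.replicate tl 0) := by
  unfold pvPairs
  rw [List.foldl_flatMap]
  simp only [List.foldl_map]

-- turn a guarded scatter table entry into pvF
theorem pv_table_getD (items_len : Nat) (tbl_len : Nat) (d : Nat → Nat → Int) (j : Nat)
    (hb : ∀ a b, a < b → b < items_len → (a + b) % 2 = 1 → (a + b - 1) / 2 < tbl_len) :
    ((pvPairs items_len).foldl (fun t x => if (x.1 + x.2) % 2 == 1 then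
        t.set ((x.1 + x.2 - 1) / 2) (t.getD ((x.1 + x.2 - 1) / 2) 0 + d x.1 x.2)
        else t) (List.replicate tbl_len 0)).getD j 0
      = pvF d items_len j := by
  rw [pv_scatter_getD (c := fun x => (x.1 + x.2) % 2 == 1) (f := fun x => (x.1 + x.2 - 1) / 2)
      (v := fun x => d x.1 x.2)
      (h := fun x hx hcx => by
        rw [pv_mem_pairs] at hx
        rw [List.length_replicate]
        exact hb x.1 x.2 hx.1 hx.2 (by simpa using hcx))]
  have hz : (List.replicate tbl_len (0:Int)).getD j 0 = 0 := by
    simp [List.getD_eq_getElem?_getD, List.getElem?_replicate]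
    split <;> rfl
  rw [hz, zero_add, pv_pairs_sum]
  unfold pvF
  refine Finset.sum_congr rfl (fun a ha => Finset.sum_congr rfl (fun b hb' => ?_))
  simp only [beq_iff_eq]
  by_cases hab : a < b
  · rw [if_pos hab]
    by_cases hc : a + b = 2 * j + 1
    · rw [if_pos (show (a + b) % 2 = 1 ∧ (a + b - 1) / 2 = j by constructor <;> omega), if_pos ⟨hab, hc⟩]
    · rw [if_neg (by rintro ⟨h1, h2⟩; omega), if_neg (by rintro ⟨h1, h2⟩; omega)]
  · rw [if_neg hab, if_neg (by rintro ⟨h1, h2⟩; omega)]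

-- the two summary folds as Finset sums of the table entries
theorem pv_fold_zipIdx (vs : List Int) (t init : Int) (w : Nat → Int) :
    vs.zipIdx.foldl (fun tot p => if p.1 == t then tot + w p.2 else tot) init
      = init + ∑ j ∈ Finset.range vs.length, (if vs.getD j 0 = t then w j else 0) := by
  induction vs generalizing init w with
  | nil => simp
  | cons v tl ih =>
      rw [List.zipIdx_cons, List.foldl_cons]
      have hsh : ∀ (f : Nat → Int) (x : Int), (tl.zipIdx 1).foldl (fun tot p => if p.1 == t then tot + f p.2 else tot) x =
          (tl.zipIdx).foldl (fun tot p => if p.1 == t then tot + f (p.2 + 1) else tot) x := by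
        intro f x
        rw [List.zipIdx_succ, List.foldl_map]
      simp only [Nat.zero_add]
      rw [hsh w, ih _ (fun j => w (j + 1))]
      simp only [List.length_cons, Finset.sum_range_succ', List.getD_cons_succ, List.getD_cons_zero]
      by_cases hv : v = t
      · rw [if_pos (by simpa using hv), if_pos hv]; ring
      · rw [if_neg (by simpa using hv), if_neg hv]; ring

-- A's filtered-enumerate summary as the same Finset sum
theorem pv_A_summary (vs : List Int) (t : Int) (w : Nat → Int) :
    ((vs.zipIdx.filter (fun p => p.1 == t)).map (fun p => w p.2)).sum
      = ∑ j ∈ Finset.range vs.length, (if vs.getD j 0 = t then w j else 0) := by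
  induction vs generalizing w with
  | nil => simp
  | cons v tl ih =>
      rw [List.zipIdx_cons, List.zipIdx_succ]
      rw [List.filter_cons]
      simp only [List.length_cons, Finset.sum_range_succ', List.getD_cons_succ, List.getD_cons_zero]
      have hfm : (List.filter (fun p => p.1 == t) (tl.zipIdx.map (fun p => (p.1, p.2 + 1)))).map
            (fun p => w p.2)
          = (List.filter (fun p => p.1 == t) tl.zipIdx).map (fun p => w (p.2 + 1)) := by
        rw [List.filter_map, List.map_map]
        rfl
      by_cases hv : v = t
      · rw [if_pos (by simpa using hv), List.map_cons, List.sum_cons, hfm, ih (fun j => w (j + 1)),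
          if_pos hv]
        ring
      · rw [if_neg (by simpa using hv), hfm, ih (fun j => w (j + 1)), if_neg hv]
        ring

-- B's score as a Finset sum over pvF
theorem pv_score_eq (lines : List (List Char)) (t : Int) :
    pvB_score lines t
      = ∑ j ∈ Finset.range (lines.length - 1),
          (if pvF (fun a b => pvB_mism (lines.getD a []) (lines.getD b [])) lines.length j = t
           then ((j : Int) + 1) else 0) := by
  unfold pvB_score pvB_table
  rw [pv_scatterTable_eq]
  rw [pv_fold_zipIdx _ _ _ (fun j => ((j : Int) + 1)), zero_add]
  have hlen : ((pvPairs lines.length).foldl (fun tbl x => if (x.1 + x.2) % 2 == 1 then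
      tbl.set ((x.1 + x.2 - 1) / 2)
        (tbl.getD ((x.1 + x.2 - 1) / 2) 0 + pvB_mism (lines.getD x.1 []) (lines.getD x.2 []))
      else tbl) (List.replicate (lines.length - 1) 0)).length = lines.length - 1 := by
    rw [pv_scatter_length, List.length_replicate]
  rw [hlen]
  refine Finset.sum_congr rfl (fun j hj => ?_)
  rw [pv_table_getD lines.length (lines.length - 1)
    (fun a b => pvB_mism (lines.getD a []) (lines.getD b [])) j
    (by intro a b h1 h2 h3; omega)]

-- the min-length fold bounds and attains
theorem pv_foldl_min_le (l : List (List Char)) (acc : Nat) :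
    l.foldl (fun a s => min a s.length) acc ≤ acc := by
  induction l generalizing acc with
  | nil => simp
  | cons s t ih => exact le_trans (ih (min acc s.length)) (Nat.min_le_left _ _)

theorem pv_minLen_le (r : List Char) (rs : List (List Char)) :
    pvB_minLen (r :: rs) ≤ r.length := pv_foldl_min_le rs r.length

theorem pv_foldl_min_mem (l : List (List Char)) (acc : Nat) :
    l.foldl (fun a s => min a s.length) acc = acc
      ∨ ∃ s ∈ l, l.foldl (fun a s => min a s.length) acc = s.length := by
  induction l generalizing acc with
  | nil => exact Or.inl rfl
  | cons r rs ih =>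
      rw [List.foldl_cons]
      rcases ih (min acc r.length) with h | ⟨s, hs, h⟩
      · rcases Nat.le_total acc r.length with hle | hle
        · exact Or.inl (by rw [h]; omega)
        · exact Or.inr ⟨r, by simp, by rw [h]; omega⟩
      · exact Or.inr ⟨s, List.mem_cons_of_mem _ hs, h⟩

theorem pv_foldl_min_lb (l : List (List Char)) (acc : Nat) (s : List Char) (hs : s ∈ l) :
    l.foldl (fun a t => min a t.length) acc ≤ s.length := by
  induction l generalizing acc with
  | nil => cases hs
  | cons r rs ih =>
      rw [List.foldl_cons]
      rw [List.mem_cons] at hs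
      rcases hs with rfl | hs
      · exact le_trans (pv_foldl_min_le rs _) (Nat.min_le_right _ _)
      · exact ih _ hs

-- L < n ↔ some row is shorter than row 0
theorem pv_minLen_lt_iff (r : List Char) (rs : List (List Char)) :
    pvB_minLen (r :: rs) < r.length ↔ ∃ s ∈ (r :: rs), s.length < r.length := by
  have hd : pvB_minLen (r :: rs) = rs.foldl (fun a s => min a s.length) r.length := rfl
  constructor
  · intro h
    rw [hd] at h
    rcases pv_foldl_min_mem rs r.length with he | ⟨s, hs, he⟩
    · rw [he] at h
      exact absurd h (lt_irrefl _)
    · exact ⟨s, List.mem_cons_of_mem _ hs, by omega⟩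
  · rintro ⟨s, hs, hlt⟩
    rw [List.mem_cons] at hs
    rcases hs with rfl | hs
    · exact absurd hlt (lt_irrefl _)
    · rw [hd]
      exact lt_of_le_of_lt (pv_foldl_min_lb rs r.length s hs) hlt

-- the surplus A adds over B: the phantom column boundaries
def pvExtra (grid : List String) (nd : Int) : Int :=
  if nd = 0 then
    ∑ j ∈ Finset.Ico (pvB_minLen (grid.map String.toList) - 1)
        (((grid.map String.toList).getD 0 []).length - 1), ((j : Int) + 1)
  else 0

-- main decomposition: A = B + surplus (rows agree; columns agree up to the phantom boundaries)
theorem pv_main (grid : List String) (nd : Int) (h : grid ≠ []) :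
    summarise_notes grid nd = summarise_notes_alt grid nd + pvExtra grid nd := by
  obtain ⟨g0, gs, rfl⟩ : ∃ g0 gs, grid = g0 :: gs := by
    cases grid with
    | nil => exact absurd rfl h
    | cons g0 gs => exact ⟨g0, gs, rfl⟩
  simp only [summarise_notes, summarise_notes_alt, pvExtra]
  set rows := (g0 :: gs).map String.toList with hrows
  have hrne : rows ≠ [] := by simp [hrows]
  set n := (rows.getD 0 []).length with hn
  set L := pvB_minLen rows with hL
  have hLA : pvA_minLen rows = L := rfl
  have hLn : L ≤ n := by
    rw [hL, hn, hrows]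
    simpa using pv_minLen_le g0.toList (gs.map String.toList)
  have hcols : pvA_transpose rows = pvB_cols rows := rfl
  have hclen : (pvB_cols rows).length = L := by
    simp [pvB_cols, hL]
  -- horizontal part
  have hh : ((((List.range (rows.length - 1)).map
        (fun j => pvA_sumDifferences ((rows.take (j+1)).reverse) (rows.drop (j+1)))).zipIdx.filter
          (fun p => p.1 == nd)).map (fun p => 100 * ((p.2 : Int) + 1))).sum
      = 100 * pvB_score rows nd := by
    rw [pv_A_summary _ _ (fun j => 100 * ((j : Int) + 1)), pv_score_eq, Finset.mul_sum]
    simp only [List.length_map, List.length_range]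
    refine Finset.sum_congr rfl (fun j hj => ?_)
    rw [Finset.mem_range] at hj
    rw [List.getD_eq_getElem _ _ (by simpa using hj), List.getElem_map, List.getElem_range,
      pv_entry_eq_F]
    have : ∀ a b : Nat, pvA_mism (rows.getD a []) (rows.getD b [])
        = pvB_mism (rows.getD a []) (rows.getD b []) := fun a b => rfl
    simp only [this]
    split <;> simp
  rw [hh]
  -- vertical part
  have hv : ((((List.range (n - 1)).map
        (fun i => pvA_sumDifferences (((pvA_transpose rows).take (i+1)).reverse)
          ((pvA_transpose rows).drop (i+1)))).zipIdx.filter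
          (fun p => p.1 == nd)).map (fun p => ((p.2 : Int) + 1))).sum
      = pvB_score (pvB_cols rows) nd
        + (if nd = 0 then ∑ j ∈ Finset.Ico (L - 1) (n - 1), ((j : Int) + 1) else 0) := by
    rw [pv_A_summary _ _ (fun j => ((j : Int) + 1)), pv_score_eq]
    simp only [List.length_map, List.length_range, hclen]
    have hsplit : Finset.range (n - 1) = Finset.Ico 0 (L - 1) ∪ Finset.Ico (L - 1) (n - 1) := by
      rw [Finset.Ico_union_Ico_eq_Ico (by omega) (by omega), ← Finset.range_eq_Ico]
    rw [hsplit, Finset.sum_union (by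
      refine Finset.disjoint_left.mpr (fun x hx1 hx2 => ?_)
      rw [Finset.mem_Ico] at hx1 hx2
      omega)]
    have hnice : ∀ j, j ∈ Finset.Ico 0 (L - 1) →
        (if ((List.range (n-1)).map
            (fun i => pvA_sumDifferences (((pvA_transpose rows).take (i+1)).reverse)
              ((pvA_transpose rows).drop (i+1)))).getD j 0 = nd then ((j : Int) + 1) else 0)
          = (if pvF (fun a b => pvB_mism ((pvB_cols rows).getD a []) ((pvB_cols rows).getD b []))
              ((pvB_cols rows).length) j = nd then ((j : Int) + 1) else 0) := by
      intro j hj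
      rw [Finset.mem_Ico] at hj
      rw [List.getD_eq_getElem _ _ (by simp; omega), List.getElem_map, List.getElem_range,
        pv_entry_eq_F, hcols]
      rfl
    rw [Finset.sum_congr rfl hnice, ← Finset.range_eq_Ico]
    congr 1
    · -- B's sum over range (L-1) equals the Ico 0 (L-1) part
      rw [hclen]
    · -- phantom part
      have hzero : ∀ j ∈ Finset.Ico (L - 1) (n - 1),
          ((List.range (n-1)).map
            (fun i => pvA_sumDifferences (((pvA_transpose rows).take (i+1)).reverse)
              ((pvA_transpose rows).drop (i+1)))).getD j 0 = 0 := by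
        intro j hj
        rw [Finset.mem_Ico] at hj
        rw [List.getD_eq_getElem _ _ (by simp; omega), List.getElem_map, List.getElem_range,
          pv_entry_eq_F]
        have hlen : (pvA_transpose rows).length = L := by rw [hcols, hclen]
        rw [hlen]
        exact pv_F_zero _ _ _ (by omega)
      rw [Finset.sum_congr rfl (fun j hj => by rw [hzero j hj])]
      by_cases hnd : nd = 0
      · rw [if_pos hnd]
        exact Finset.sum_congr rfl (fun j hj => by rw [if_pos hnd.symm])
      · rw [if_neg hnd]
        exact Finset.sum_eq_zero (fun j hj => by rw [if_neg (fun hc => hnd hc.symm)])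
  rw [hv]
  ring

-- surplus is zero outside D_, positive inside D_
theorem pv_extra_zero (grid : List String) (nd : Int) (h : grid ≠ [])
    (hD : ¬ D_summarise_notes grid nd) : pvExtra grid nd = 0 := by
  obtain ⟨g0, gs, rfl⟩ : ∃ g0 gs, grid = g0 :: gs := by
    cases grid with
    | nil => exact absurd rfl h
    | cons g0 gs => exact ⟨g0, gs, rfl⟩
  unfold pvExtra
  by_cases hnd : nd = 0
  · rw [if_pos hnd]
    unfold D_summarise_notes at hD
    push Not at hD
    have hD' := hD hnd
    set L := pvB_minLen ((g0 :: gs).map String.toList) with hL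
    have hn0 : (((g0 :: gs).map String.toList).getD 0 []).length = g0.length := by
      simp [String.length_toList]
    rw [hn0]
    have hhead : ((g0 :: gs).headD "").length = g0.length := rfl
    rw [hhead] at hD'
    by_cases h2 : 2 ≤ g0.length
    · -- no shorter row, hence L = g0.length
      have hns := hD' h2
      have hLlt : ¬ (L < g0.length) := by
        intro hlt
        have hlt' : pvB_minLen (g0.toList :: gs.map String.toList) < g0.toList.length := by
          rw [String.length_toList]
          simpa [hL] using hlt
        obtain ⟨s, hs, hlen⟩ := (pv_minLen_lt_iff g0.toList (gs.map String.toList)).mp hlt'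
        rw [show (g0.toList :: gs.map String.toList) = (g0 :: gs).map String.toList from rfl,
          List.mem_map] at hs
        obtain ⟨t, ht, rfl⟩ := hs
        rw [String.length_toList, String.length_toList] at hlen
        exact absurd (hns t ht) (by omega)
      rw [Finset.Ico_eq_empty (by omega), Finset.sum_empty]
    · -- g0 too short: the phantom range is empty
      have hLle : L ≤ g0.length := by
        have := pv_minLen_le g0.toList (gs.map String.toList)
        rw [String.length_toList] at this
        simpa [hL] using this
      rw [Finset.Ico_eq_empty (by omega), Finset.sum_empty]
  · rw [if_neg hnd]

theorem pv_extra_pos (grid : List String) (nd : Int) (h : grid ≠ [])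
    (hD : D_summarise_notes grid nd) : 0 < pvExtra grid nd := by
  obtain ⟨g0, gs, rfl⟩ : ∃ g0 gs, grid = g0 :: gs := by
    cases grid with
    | nil => exact absurd rfl h
    | cons g0 gs => exact ⟨g0, gs, rfl⟩
  obtain ⟨hnd, h2, s, hs, hlen⟩ := hD
  unfold pvExtra
  rw [if_pos hnd]
  have hhead : ((g0 :: gs).headD "").length = g0.length := rfl
  rw [hhead] at h2 hlen
  set L := pvB_minLen ((g0 :: gs).map String.toList) with hL
  have hn0 : (((g0 :: gs).map String.toList).getD 0 []).length = g0.length := by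
    simp [String.length_toList]
  rw [hn0]
  have hLlt : L < g0.length := by
    have hex : ∃ t ∈ (g0.toList :: gs.map String.toList), t.length < g0.toList.length := by
      refine ⟨s.toList, ?_, by rw [String.length_toList, String.length_toList]; exact hlen⟩
      rw [List.mem_cons] at hs
      rcases hs with rfl | hs
      · exact List.mem_cons_self
      · exact List.mem_cons_of_mem _ (List.mem_map_of_mem hs)
    have := (pv_minLen_lt_iff g0.toList (gs.map String.toList)).mpr hex
    rw [String.length_toList] at this
    simpa [hL] using this
  refine Finset.sum_pos (fun j hj => ?_) ?_
  · rw [Finset.mem_Ico] at hj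
    positivity
  · refine ⟨L - 1, ?_⟩
    rw [Finset.mem_Ico]
    omega

-- ===== VERDICT (by name: the statement is the Claim_ definition above) =====
theorem summarise_notes_spec : Claim_unchanged_summarise_notes := by
  intro grid nd _ hpre hD
  have := pv_main grid nd hpre
  rw [this, pv_extra_zero grid nd hpre hD]
  ring

theorem summarise_notes_changed : Claim_changed_summarise_notes := by
  unfold Claim_changed_summarise_notes
  refine ⟨by decide, by decide, by decide, by decide, by decide, by decide⟩

theorem summarise_notes_tight : Claim_exact_summarise_notes := by
  intro grid nd _ hpre hD
  have hm := pv_main grid nd hpre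
  have hp := pv_extra_pos grid nd hpre hD
  omega
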